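-- pv_equiv track=rewrite | github.com/luv1327/Scaler_Dsa | IntermediateDsa1/carryForward.py | findMinMaxClosest
-- ===== SOURCE A (Python) =====
-- def findMinMaxClosest(A):
--     n = len(A)
--     min_length = float('+inf')
--     max_element = max(A)
--     min_element = min(A)
--     if min_element == max_element:
--         return 1
--     for i in range(n):
--         if A[i] == min_element:
--             for j in range(i+1,n):
--                 if A[j] == max_element:
--                     current_length = j-i+1
--                     min_length = min(min_length,current_length)
--                     break
--         if A[i] == max_element:
--             for j in range(i+1,n):
--                 if A[j] == min_element:
--                     current_length = j-i+1
--                     min_length = min(min_length,current_length)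
--                     break
--     return min_length
-- ===== SOURCE B (Python) =====
-- def findMinMaxClosest(A):
--     mn = min(A)
--     mx = max(A)
--     if mn == mx:
--         return 1
--     best = None
--     last_mn = None
--     last_mx = None
--     for i, x in enumerate(A):
--         if x == mn:
--             if last_mx is not None:
--                 c = i - last_mx + 1
--                 if best is None or c < best:
--                     best = c
--             last_mn = i
--         if x == mx:
--             if last_mn is not None:
--                 c = i - last_mn + 1
--                 if best is None or c < best:
--                     best = c
--             last_mx = i
--     return best
-- ===== Notes on version B (the rewrite author's own statement) =====
-- stated objective: alternative
-- what changed: Replaced the per-index forward rescan (for every min/max position scan ahead for the first partner) by a single pass that tracks the last-seen positions of the global min and max and takes the best window ending at each index; this removes A's nested inner scans (quadratic in the worst case) though on random inputs the measured times are similar.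
-- outside the precondition, e.g. on findMinMaxClosest([]): A raises ValueError, B raises ValueError
import Mathlib
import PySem

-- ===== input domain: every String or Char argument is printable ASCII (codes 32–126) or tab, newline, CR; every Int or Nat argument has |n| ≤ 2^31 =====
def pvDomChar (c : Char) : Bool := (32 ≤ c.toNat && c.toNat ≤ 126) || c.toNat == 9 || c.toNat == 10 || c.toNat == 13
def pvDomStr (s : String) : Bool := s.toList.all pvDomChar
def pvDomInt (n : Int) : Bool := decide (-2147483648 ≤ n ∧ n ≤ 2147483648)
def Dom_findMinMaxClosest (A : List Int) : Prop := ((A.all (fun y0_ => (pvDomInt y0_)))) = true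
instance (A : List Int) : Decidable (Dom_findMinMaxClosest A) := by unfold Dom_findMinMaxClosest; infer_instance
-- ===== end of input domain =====

-- B replaces A's per-index forward rescans by one pass tracking the last-seen min/max positions (objective: alternative algorithm).

-- Python's `min_length = min(min_length, current_length)` where min_length may be float('inf') (port A)
def optMin (o : Option Int) (c : Int) : Option Int :=
  match o with
  | none => some c
  | some v => some (min v c)

-- Python's `if best is None or c < best: best = c` (port B)
def bestUpd (o : Option Int) (c : Int) : Option Int :=
  match o with
  | some v => if c < v then some c else some v
  | none => some c

-- ===== PORT A =====
def findMinMaxClosest (A : List Int) : Int :=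
  let n := A.length
  match PySem.List.max? A (fun x => x), PySem.List.min? A (fun x => x) with
  | some mx, some mn =>
    if mn = mx then 1
    else
      -- for i in range(n): two sequential ifs, each with an inner `for j in range(i+1, n): … break` = find?
      let r := (List.range n).foldl (fun (st : Option Int) i =>
        let st1 := if A.getD i 0 = mn then
            match (List.range' (i+1) (n - (i+1))).find? (fun j => decide (A.getD j 0 = mx)) with
            | some j => optMin st ((j : Int) - (i : Int) + 1)
            | none => st
          else st
        if A.getD i 0 = mx then
            match (List.range' (i+1) (n - (i+1))).find? (fun j => decide (A.getD j 0 = mn)) with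
            | some j => optMin st1 ((j : Int) - (i : Int) + 1)
            | none => st1
          else st1) none
      r.getD 1  -- `none` is unreachable for nonempty A with mn ≠ mx (Python would return float('inf') there)
  | _, _ => 0  -- empty A: Python raises ValueError (excluded by Pre_)

-- ===== PORT B =====
def findMinMaxClosest_alt (A : List Int) : Int :=
  match PySem.List.min? A (fun x => x) with
  | none => 0  -- empty A: Python raises ValueError (excluded by Pre_)
  | some mn =>
   match PySem.List.max? A (fun x => x) with
   | none => 0  -- unreachable: A nonempty here
   | some mx =>
    if mn = mx then 1
    else
      -- state (last_mn, last_mx, best); one pass over enumerate(A)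
      let st := (PySem.List.enumerate A 0).foldl
        (fun (s : Option Int × Option Int × Option Int) p =>
          let i := p.1; let x := p.2
          let lastMn := s.1; let lastMx := s.2.1; let best := s.2.2
          let best := if x = mn then
              (match lastMx with | some k => bestUpd best (i - k + 1) | none => best)
            else best
          let lastMn := if x = mn then some i else lastMn
          let best := if x = mx then
              (match lastMn with | some k => bestUpd best (i - k + 1) | none => best)
            else best
          let lastMx := if x = mx then some i else lastMx
          (lastMn, lastMx, best)) (none, none, none)
      st.2.2.getD 1  -- `none` is unreachable for nonempty A with mn ≠ mx (Python would return None there)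

-- ===== PRECONDITION & SPEC =====
-- Pre_ excludes only the empty list, on which Python A raises ValueError (max of empty sequence).
def Pre_findMinMaxClosest (A : List Int) : Prop := A ≠ []
instance (A : List Int) : Decidable (Pre_findMinMaxClosest A) := by unfold Pre_findMinMaxClosest; infer_instance
def pvWitness_findMinMaxClosest : List Int := [1, 2]

def Spec_findMinMaxClosest (A : List Int) (out : Int) : Prop := out = findMinMaxClosest_alt A
instance (A : List Int) (out : Int) : Decidable (Spec_findMinMaxClosest A out) := by unfold Spec_findMinMaxClosest; infer_instance

-- ===== CLAIM (what is proved, stated in full; the proofs are below) =====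
def Claim_equal_findMinMaxClosest : Prop := ∀ (A : List Int), Dom_findMinMaxClosest A → Pre_findMinMaxClosest A → Spec_findMinMaxClosest A (findMinMaxClosest A)

-- ===== LEMMAS AND PROOFS =====

-- the loop bodies of the two ports, named for the proofs (definitionally equal to the inline lambdas)
def stepA (A : List Int) (n : Nat) (mn mx : Int) (st : Option Int) (i : Nat) : Option Int :=
  let st1 := if A.getD i 0 = mn then
      match (List.range' (i+1) (n - (i+1))).find? (fun j => decide (A.getD j 0 = mx)) with
      | some j => optMin st ((j : Int) - (i : Int) + 1)
      | none => st
    else st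
  if A.getD i 0 = mx then
      match (List.range' (i+1) (n - (i+1))).find? (fun j => decide (A.getD j 0 = mn)) with
      | some j => optMin st1 ((j : Int) - (i : Int) + 1)
      | none => st1
    else st1

def stepB (mn mx : Int) (s : Option Int × Option Int × Option Int) (p : Int × Int) :
    Option Int × Option Int × Option Int :=
  let i := p.1; let x := p.2
  let lastMn := s.1; let lastMx := s.2.1; let best := s.2.2
  let best := if x = mn then
      (match lastMx with | some k => bestUpd best (i - k + 1) | none => best)
    else best
  let lastMn := if x = mn then some i else lastMn
  let best := if x = mx then
      (match lastMn with | some k => bestUpd best (i - k + 1) | none => best)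
    else best
  let lastMx := if x = mx then some i else lastMx
  (lastMn, lastMx, best)

-- last index k < j with A[k] = v (B's last_mn / last_mx before step j)
def lastIdx (A : List Int) (v : Int) : Nat → Option Nat
  | 0 => none
  | k+1 => if A.getD k 0 = v then some k else lastIdx A v k

-- first index j >= lo with A[j] = v (A's inner scan)
def firstIdx (A : List Int) (v : Int) (lo : Nat) : Option Nat :=
  (List.range' lo (A.length - lo)).find? (fun j => decide (A.getD j 0 = v))

-- candidates contributed by A's iteration i
def contribA (A : List Int) (mn mx : Int) (i : Nat) : List Int :=
  (if A.getD i 0 = mn then ((firstIdx A mx (i+1)).map (fun j => (j : Int) - (i : Int) + 1)).toList else [])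
  ++ (if A.getD i 0 = mx then ((firstIdx A mn (i+1)).map (fun j => (j : Int) - (i : Int) + 1)).toList else [])

-- candidates contributed by B's iteration j (the inner `if` mirrors the in-iteration update of last_mn)
def contribB (A : List Int) (mn mx : Int) (j : Nat) : List Int :=
  (if A.getD j 0 = mn then ((lastIdx A mx j).map (fun k => (j : Int) - (k : Int) + 1)).toList else [])
  ++ (if A.getD j 0 = mx then ((if A.getD j 0 = mn then some j else lastIdx A mn j).map (fun k => (j : Int) - (k : Int) + 1)).toList else [])

def foldMin (L : List Int) : Option Int := L.foldl optMin none

theorem foldl_optMin_some (L : List Int) (a : Int) :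
    ∃ v, L.foldl optMin (some a) = some v ∧ (v = a ∨ v ∈ L) ∧ v ≤ a ∧ ∀ c ∈ L, v ≤ c := by
  induction L generalizing a with
  | nil => exact ⟨a, rfl, Or.inl rfl, le_refl a, by simp⟩
  | cons x t ih =>
    obtain ⟨v, h1, h2, h3, h4⟩ := ih (min a x)
    refine ⟨v, by simpa [optMin] using h1, ?_, ?_, ?_⟩
    · rcases h2 with h | h
      · rcases le_total a x with hx | hx
        · exact Or.inl (by rw [h, min_eq_left hx])
        · refine Or.inr ?_
          rw [h, min_eq_right hx]
          exact List.mem_cons_self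
      · exact Or.inr (List.mem_cons_of_mem _ h)
    · exact le_trans h3 (min_le_left _ _)
    · intro c hc
      rcases List.mem_cons.mp hc with rfl | hc
      · exact le_trans h3 (min_le_right _ _)
      · exact h4 c hc

theorem foldMin_spec (L : List Int) (h : L ≠ []) :
    ∃ v, foldMin L = some v ∧ v ∈ L ∧ ∀ c ∈ L, v ≤ c := by
  cases L with
  | nil => exact absurd rfl h
  | cons x t =>
    obtain ⟨v, h1, h2, h3, h4⟩ := foldl_optMin_some t x
    refine ⟨v, by simpa [foldMin, optMin] using h1, ?_, ?_⟩
    · rcases h2 with rfl | h2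
      · exact List.mem_cons_self
      · exact List.mem_cons_of_mem _ h2
    · intro c hc
      rcases List.mem_cons.mp hc with rfl | hc
      · exact h3
      · exact h4 c hc

theorem foldMin_dom (L1 L2 : List Int)
    (h1 : ∀ c ∈ L1, ∃ d ∈ L2, d ≤ c) (h2 : ∀ c ∈ L2, ∃ d ∈ L1, d ≤ c) :
    foldMin L1 = foldMin L2 := by
  rcases eq_or_ne L1 [] with rfl | hn1
  · rcases eq_or_ne L2 [] with rfl | hn2
    · rfl
    · obtain ⟨v, _, hv, _⟩ := foldMin_spec L2 hn2
      obtain ⟨d, hd, _⟩ := h2 v hv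
      simp at hd
  · obtain ⟨v1, e1, m1, lb1⟩ := foldMin_spec L1 hn1
    have hn2 : L2 ≠ [] := by
      intro h; subst h
      obtain ⟨d, hd, _⟩ := h1 v1 m1
      simp at hd
    obtain ⟨v2, e2, m2, lb2⟩ := foldMin_spec L2 hn2
    rw [e1, e2]
    obtain ⟨d2, hd2, hle2⟩ := h1 v1 m1
    obtain ⟨d1, hd1, hle1⟩ := h2 v2 m2
    have hx1 := lb1 d1 hd1
    have hx2 := lb2 d2 hd2
    have : v1 = v2 := by omega
    rw [this]

theorem foldl_optMin_flatMap {α : Type} (l : List α) (g : α → List Int) (st : Option Int) :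
    l.foldl (fun st i => (g i).foldl optMin st) st = (l.flatMap g).foldl optMin st := by
  induction l generalizing st with
  | nil => rfl
  | cons x t ih => simp [List.flatMap_cons, List.foldl_append, ih]

theorem stepA_eq_foldl (A : List Int) (mn mx : Int) (st : Option Int) (i : Nat) :
    stepA A A.length mn mx st i = (contribA A mn mx i).foldl optMin st := by
  unfold stepA contribA firstIdx
  by_cases h1 : A.getD i 0 = mn <;> by_cases h2 : A.getD i 0 = mx <;>
    simp only [h1, h2, if_true, if_false, if_pos, if_neg, not_false_iff] <;>
    cases (List.range' (i+1) (A.length - (i+1))).find? (fun j => decide (A.getD j 0 = mx)) <;>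
    cases (List.range' (i+1) (A.length - (i+1))).find? (fun j => decide (A.getD j 0 = mn)) <;>
    simp [List.foldl_append] <;> try (split <;> simp [List.foldl_append])

theorem lastIdx_some (A : List Int) (v : Int) (k i : Nat) (h : lastIdx A v k = some i) :
    i < k ∧ A.getD i 0 = v := by
  induction k with
  | zero => simp [lastIdx] at h
  | succ k ih =>
    by_cases hk : A.getD k 0 = v
    · simp only [lastIdx, if_pos hk, Option.some.injEq] at h
      exact ⟨by omega, h ▸ hk⟩
    · simp only [lastIdx, if_neg hk] at h
      obtain ⟨h1, h2⟩ := ih h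
      exact ⟨by omega, h2⟩

theorem lastIdx_ge (A : List Int) (v : Int) (i k : Nat) (hi : A.getD i 0 = v) (hik : i < k) :
    ∃ j, lastIdx A v k = some j ∧ i ≤ j := by
  induction k with
  | zero => omega
  | succ k ih =>
    by_cases hk : A.getD k 0 = v
    · exact ⟨k, by simp only [lastIdx, if_pos hk], by omega⟩
    · have : i < k := by
        rcases Nat.lt_succ_iff_lt_or_eq.mp hik with h | rfl
        · exact h
        · exact absurd hi hk
      obtain ⟨j, h1, h2⟩ := ih this
      exact ⟨j, by simp only [lastIdx, if_neg hk, h1], h2⟩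

theorem find?_range'_le (p : Nat → Bool) (m lo j : Nat) (h1 : lo ≤ j) (h2 : j < lo + m)
    (hp : p j = true) : ∃ j', (List.range' lo m).find? p = some j' ∧ j' ≤ j := by
  induction m generalizing lo with
  | zero => omega
  | succ m ih =>
    rw [List.range'_succ]
    by_cases hl : p lo
    · exact ⟨lo, by simp [List.find?_cons, hl], h1⟩
    · have hne : lo ≠ j := by rintro rfl; exact hl hp
      obtain ⟨j', hj1, hj2⟩ := ih (lo + 1) (by omega) (by omega)
      exact ⟨j', by simp [List.find?_cons, hl, hj1], hj2⟩

theorem firstIdx_some (A : List Int) (v : Int) (lo j : Nat) (h : firstIdx A v lo = some j) :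
    lo ≤ j ∧ j < A.length ∧ A.getD j 0 = v := by
  unfold firstIdx at h
  have hmem := List.mem_of_find?_eq_some h
  have hp := List.find?_some h
  rw [List.mem_range'_1] at hmem
  have : lo ≤ A.length := by
    by_contra hc
    have : A.length - lo = 0 := by omega
    rw [this] at hmem
    omega
  exact ⟨hmem.1, by omega, by simpa using hp⟩

theorem firstIdx_le (A : List Int) (v : Int) (lo j : Nat) (hj : A.getD j 0 = v)
    (hlo : lo ≤ j) (hjn : j < A.length) :
    ∃ j', firstIdx A v lo = some j' ∧ j' ≤ j := by
  unfold firstIdx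
  exact find?_range'_le _ (A.length - lo) lo j hlo (by omega) (by simpa using hj)

theorem bestUpd_eq_optMin (o : Option Int) (c : Int) : bestUpd o c = optMin o c := by
  cases o with
  | none => rfl
  | some v =>
    simp only [bestUpd, optMin]
    rcases lt_or_ge c v with h | h
    · rw [if_pos h, min_eq_right (le_of_lt h)]
    · rw [if_neg (not_lt.mpr h), min_eq_left h]

-- B's state after processing the first k indices
theorem B_state (A : List Int) (mn mx : Int) (hne : mn ≠ mx) (k : Nat) :
    ((List.range k).map (fun j : Nat => ((j : Int), A.getD j 0))).foldl (stepB mn mx) (none, none, none)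
      = ((lastIdx A mn k).map (fun x => (x : Int)), (lastIdx A mx k).map (fun x => (x : Int)),
          foldMin ((List.range k).flatMap (contribB A mn mx))) := by
  induction k with
  | zero => rfl
  | succ k ih =>
    rw [List.range_succ, List.map_append, List.foldl_append, ih, List.flatMap_append]
    simp only [List.map_cons, List.map_nil, List.foldl_cons, List.foldl_nil,
      List.flatMap_cons, List.flatMap_nil, List.append_nil]
    show stepB mn mx _ _ = _
    unfold stepB contribB foldMin
    simp only [bestUpd_eq_optMin]
    rw [List.foldl_append]
    by_cases h1 : A.getD k 0 = mn
    · have h2 : ¬ A.getD k 0 = mx := by rw [h1]; exact hne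
      simp only [h1, h2, if_true, if_false, lastIdx, if_pos, if_neg, not_false_iff]
      cases hx : lastIdx A mx k <;> simp [hx, hne, hne.symm]
    · by_cases h2 : A.getD k 0 = mx
      · simp only [h1, h2, if_true, if_false, lastIdx, if_pos, if_neg, not_false_iff]
        cases hx : lastIdx A mn k <;> simp [hx, hne, hne.symm, h1]
      · simp only [h1, h2, if_false, lastIdx, if_neg, not_false_iff]
        simp [h1, h2]

theorem mem_contribA (A : List Int) (mn mx : Int) (hne : mn ≠ mx) (i : Nat) (c : Int) :
    c ∈ contribA A mn mx i ↔
      ((A.getD i 0 = mn ∧ ∃ j, firstIdx A mx (i+1) = some j ∧ c = (j : Int) - (i : Int) + 1) ∨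
       (A.getD i 0 = mx ∧ ∃ j, firstIdx A mn (i+1) = some j ∧ c = (j : Int) - (i : Int) + 1)) := by
  unfold contribA
  rw [List.mem_append]
  by_cases h1 : A.getD i 0 = mn
  · have h2 : ¬ A.getD i 0 = mx := by rw [h1]; exact hne
    simp only [List.getD_eq_getElem?_getD] at h1 h2
    cases hf1 : firstIdx A mx (i+1) <;> simp [h1, h2, hf1, hne, hne.symm]
  · by_cases h2 : A.getD i 0 = mx
    · simp only [List.getD_eq_getElem?_getD] at h1 h2
      cases hf2 : firstIdx A mn (i+1) <;> simp [h1, h2, hf2, hne, hne.symm]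
    · simp only [List.getD_eq_getElem?_getD] at h1 h2
      simp [h1, h2]

theorem mem_contribB (A : List Int) (mn mx : Int) (hne : mn ≠ mx) (j : Nat) (c : Int) :
    c ∈ contribB A mn mx j ↔
      ((A.getD j 0 = mn ∧ ∃ k, lastIdx A mx j = some k ∧ c = (j : Int) - (k : Int) + 1) ∨
       (A.getD j 0 = mx ∧ ∃ k, lastIdx A mn j = some k ∧ c = (j : Int) - (k : Int) + 1)) := by
  unfold contribB
  rw [List.mem_append]
  by_cases h1 : A.getD j 0 = mn
  · have h2 : ¬ A.getD j 0 = mx := by rw [h1]; exact hne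
    simp only [List.getD_eq_getElem?_getD] at h1 h2
    cases hf1 : lastIdx A mx j <;> simp [h1, h2, hf1, hne, hne.symm]
  · by_cases h2 : A.getD j 0 = mx
    · simp only [List.getD_eq_getElem?_getD] at h1 h2
      cases hf2 : lastIdx A mn j <;> simp [h1, h2, hf2, hne, hne.symm]
    · simp only [List.getD_eq_getElem?_getD] at h1 h2
      simp [h1, h2]

theorem dom_AB (A : List Int) (mn mx : Int) (hne : mn ≠ mx) (c : Int)
    (hc : c ∈ (List.range A.length).flatMap (contribA A mn mx)) :
    ∃ d ∈ (List.range A.length).flatMap (contribB A mn mx), d ≤ c := by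
  rw [List.mem_flatMap] at hc
  obtain ⟨i, hi, hci⟩ := hc
  rw [List.mem_range] at hi
  rcases (mem_contribA A mn mx hne i c).mp hci with ⟨h1, j, hfj, hcv⟩ | ⟨h1, j, hfj, hcv⟩
  · obtain ⟨hij, hjn, hjv⟩ := firstIdx_some A mx (i+1) j hfj
    obtain ⟨i', hli, hii'⟩ := lastIdx_ge A mn i j h1 (by omega)
    refine ⟨(j : Int) - (i' : Int) + 1, ?_, by rw [hcv]; push_cast; omega⟩
    rw [List.mem_flatMap]
    exact ⟨j, List.mem_range.mpr hjn,
      (mem_contribB A mn mx hne j _).mpr (Or.inr ⟨hjv, i', hli, rfl⟩)⟩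
  · obtain ⟨hij, hjn, hjv⟩ := firstIdx_some A mn (i+1) j hfj
    obtain ⟨i', hli, hii'⟩ := lastIdx_ge A mx i j h1 (by omega)
    refine ⟨(j : Int) - (i' : Int) + 1, ?_, by rw [hcv]; push_cast; omega⟩
    rw [List.mem_flatMap]
    exact ⟨j, List.mem_range.mpr hjn,
      (mem_contribB A mn mx hne j _).mpr (Or.inl ⟨hjv, i', hli, rfl⟩)⟩

theorem dom_BA (A : List Int) (mn mx : Int) (hne : mn ≠ mx) (c : Int)
    (hc : c ∈ (List.range A.length).flatMap (contribB A mn mx)) :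
    ∃ d ∈ (List.range A.length).flatMap (contribA A mn mx), d ≤ c := by
  rw [List.mem_flatMap] at hc
  obtain ⟨j, hj, hcj⟩ := hc
  rw [List.mem_range] at hj
  rcases (mem_contribB A mn mx hne j c).mp hcj with ⟨h1, k, hlk, hcv⟩ | ⟨h1, k, hlk, hcv⟩
  · obtain ⟨hkj, hkv⟩ := lastIdx_some A mx j k hlk
    obtain ⟨j', hfj, hj'le⟩ := firstIdx_le A mn (k+1) j h1 (by omega) hj
    refine ⟨(j' : Int) - (k : Int) + 1, ?_, by rw [hcv]; push_cast; omega⟩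
    rw [List.mem_flatMap]
    exact ⟨k, List.mem_range.mpr (by omega),
      (mem_contribA A mn mx hne k _).mpr (Or.inr ⟨hkv, j', hfj, rfl⟩)⟩
  · obtain ⟨hkj, hkv⟩ := lastIdx_some A mn j k hlk
    obtain ⟨j', hfj, hj'le⟩ := firstIdx_le A mx (k+1) j h1 (by omega) hj
    refine ⟨(j' : Int) - (k : Int) + 1, ?_, by rw [hcv]; push_cast; omega⟩
    rw [List.mem_flatMap]
    exact ⟨k, List.mem_range.mpr (by omega),
      (mem_contribA A mn mx hne k _).mpr (Or.inl ⟨hkv, j', hfj, rfl⟩)⟩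

theorem enum_eq (A : List Int) (s : Int) :
    PySem.List.enumerate A s = (List.range A.length).map (fun k : Nat => (s + (k : Int), A.getD k 0)) := by
  induction A generalizing s with
  | nil => simp [PySem.List.enumerate_nil]
  | cons x t ih =>
    rw [PySem.List.enumerate_cons, ih, List.length_cons, List.range_succ_eq_map,
      List.map_cons, List.map_map]
    refine List.cons_eq_cons.mpr ⟨by simp, List.map_congr_left ?_⟩
    intro k hk
    simp only [Function.comp_apply, List.getD_cons_succ, Prod.mk.injEq]
    refine ⟨by push_cast; ring, by simp⟩

theorem A_unfold (A : List Int) (mn mx : Int)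
    (hmin : PySem.List.min? A (fun x => x) = some mn) (hmax : PySem.List.max? A (fun x => x) = some mx) :
    findMinMaxClosest A = if mn = mx then 1
      else (((List.range A.length).foldl (stepA A A.length mn mx) none).getD 1) := by
  unfold findMinMaxClosest
  rw [hmin, hmax]
  rfl

theorem B_unfold (A : List Int) (mn mx : Int)
    (hmin : PySem.List.min? A (fun x => x) = some mn) (hmax : PySem.List.max? A (fun x => x) = some mx) :
    findMinMaxClosest_alt A = if mn = mx then 1
      else ((((PySem.List.enumerate A 0).foldl (stepB mn mx) (none, none, none)).2.2).getD 1) := by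
  unfold findMinMaxClosest_alt
  rw [hmin, hmax]
  rfl

-- ===== VERDICT (by name: the statement is the Claim_ definition above) =====
theorem findMinMaxClosest_spec : Claim_equal_findMinMaxClosest := by
  intro A _ hpre
  unfold Spec_findMinMaxClosest
  obtain ⟨mn, hmin⟩ : ∃ mn, PySem.List.min? A (fun x => x) = some mn := by
    cases h : PySem.List.min? A (fun x => x) with
    | none => exact absurd ((PySem.List.min?_eq_none_iff A _).mp h) hpre
    | some mn => exact ⟨mn, rfl⟩
  obtain ⟨mx, hmax⟩ : ∃ mx, PySem.List.max? A (fun x => x) = some mx := by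
    cases h : PySem.List.max? A (fun x => x) with
    | none => exact absurd ((PySem.List.max?_eq_none_iff A _).mp h) hpre
    | some mx => exact ⟨mx, rfl⟩
  rw [A_unfold A mn mx hmin hmax, B_unfold A mn mx hmin hmax]
  by_cases hne : mn = mx
  · simp [hne]
  · rw [if_neg hne, if_neg hne]
    have hA : (List.range A.length).foldl (stepA A A.length mn mx) none
        = foldMin ((List.range A.length).flatMap (contribA A mn mx)) := by
      unfold foldMin
      rw [← foldl_optMin_flatMap]
      exact List.foldl_ext _ _ none (fun st i _ => stepA_eq_foldl A mn mx st i)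
    have hB : ((PySem.List.enumerate A 0).foldl (stepB mn mx) (none, none, none)).2.2
        = foldMin ((List.range A.length).flatMap (contribB A mn mx)) := by
      rw [enum_eq A 0]
      simp only [zero_add]
      rw [B_state A mn mx hne A.length]
    rw [hA, hB, foldMin_dom _ _ (dom_AB A mn mx hne) (dom_BA A mn mx hne)]
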